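-- pv_equiv track=rewrite | github.com/coderalnaim/memographix | python/memographix/integrations.py | _split_toml_blocks
-- ===== SOURCE A (Python) =====
-- def _split_toml_blocks(text: str) -> list[tuple[str, str]]:
--     blocks: list[tuple[str, str]] = []
--     current_header = ""
--     current_lines: list[str] = []
--     for line in text.splitlines(keepends=True):
--         if line.startswith("[") and line.strip().endswith("]"):
--             if current_lines:
--                 blocks.append((current_header, "".join(current_lines)))
--             current_header = line.strip()
--             current_lines = [line]
--         else:
--             current_lines.append(line)
--     if current_lines:
--         blocks.append((current_header, "".join(current_lines)))
--     return blocks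
-- ===== SOURCE B (Python) =====
-- def _split_toml_blocks(text: str) -> list[tuple[str, str]]:
--     lines = text.splitlines(keepends=True)
--
--     def is_header(line: str) -> bool:
--         return line.startswith("[") and line.strip().endswith("]")
--
--     blocks: list[tuple[str, str]] = []
--     i = 0
--     n = len(lines)
--     while i < n:
--         head = lines[i]
--         j = i + 1
--         while j < n and not is_header(lines[j]):
--             j += 1
--         header = head.strip() if is_header(head) else ""
--         blocks.append((header, "".join(lines[i:j])))
--         i = j
--     return blocks
-- ===== Notes on version B (the rewrite author's own statement) =====
-- stated objective: alternative
-- what changed: A streams lines through a state machine (current header + accumulated lines list, with a final flush); B groups lines with a two-pointer scan: each block is a head line plus the run of following non-header lines, joined by slice, with no accumulator state or flush step.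
import Mathlib
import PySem

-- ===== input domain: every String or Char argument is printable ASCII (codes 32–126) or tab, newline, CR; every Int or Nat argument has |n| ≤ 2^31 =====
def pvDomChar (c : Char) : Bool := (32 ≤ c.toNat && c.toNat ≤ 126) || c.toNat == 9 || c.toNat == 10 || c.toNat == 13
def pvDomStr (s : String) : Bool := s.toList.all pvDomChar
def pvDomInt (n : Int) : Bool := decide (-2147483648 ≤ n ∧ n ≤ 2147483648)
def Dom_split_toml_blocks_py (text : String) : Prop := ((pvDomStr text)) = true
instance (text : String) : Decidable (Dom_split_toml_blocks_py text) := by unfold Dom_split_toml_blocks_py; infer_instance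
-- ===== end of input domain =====

-- B replaces A's running state machine (header + accumulated-lines + final flush) by a
-- two-pointer grouping: each block is a head line plus the run of following non-header lines.

-- str.splitlines(keepends=True), ported by hand: exact for the line breaks '\n', '\r', '\r\n',
-- the only line breaks present in the printable-ASCII + tab/LF/CR input domain.
def pvSplitKeep (acc : List Char) : List Char → List String
  | [] => if acc = [] then [] else [String.ofList acc.reverse]
  | c :: rest =>
    if c = '\n' then String.ofList (acc.reverse ++ ['\n']) :: pvSplitKeep [] rest
    else if c = '\r' then
      if rest.head? = some '\n' then
        String.ofList (acc.reverse ++ ['\r', '\n']) :: pvSplitKeep [] rest.tail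
      else String.ofList (acc.reverse ++ ['\r']) :: pvSplitKeep [] rest
    else pvSplitKeep (c :: acc) rest
termination_by xs => xs.length
decreasing_by all_goals (simp [List.length_tail]; try omega)

-- line.startswith("[") and line.strip().endswith("]")
def pvIsHeader (line : String) : Bool :=
  PySem.Str.startswith line "[" && PySem.Str.endswith (PySem.Str.strip line) "]"

-- ===== PORT A =====
def pvStepA (st : List (String × String) × String × List String) (line : String) :
    List (String × String) × String × List String :=
  let (blocks, currentHeader, currentLines) := st
  if pvIsHeader line then
    let blocks := if currentLines ≠ [] then
        blocks ++ [(currentHeader, PySem.Str.join "" currentLines)] else blocks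
    (blocks, PySem.Str.strip line, [line])
  else
    (blocks, currentHeader, currentLines ++ [line])

def split_toml_blocks_py (text : String) : List (String × String) :=
  let st := (pvSplitKeep [] text.toList).foldl pvStepA ([], "", [])
  if st.2.2 ≠ [] then st.1 ++ [(st.2.1, PySem.Str.join "" st.2.2)] else st.1

-- ===== PORT B =====
def pvChunks : List String → List (String × String)
  | [] => []
  | head :: rest =>
    let body := rest.takeWhile (fun l => !pvIsHeader l)
    let header := if pvIsHeader head then PySem.Str.strip head else ""
    (header, PySem.Str.join "" (head :: body)) :: pvChunks (rest.drop body.length)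
termination_by xs => xs.length
decreasing_by simp; try omega

def split_toml_blocks_py_alt (text : String) : List (String × String) :=
  pvChunks (pvSplitKeep [] text.toList)

-- ===== PRECONDITION & SPEC =====
def Spec_split_toml_blocks_py (text : String) (out : List (String × String)) : Prop := out = split_toml_blocks_py_alt text
instance (text : String) (out : List (String × String)) : Decidable (Spec_split_toml_blocks_py text out) := by unfold Spec_split_toml_blocks_py; infer_instance

-- ===== CLAIM (what is proved, stated in full; the proofs are below) =====
def Claim_equal_split_toml_blocks_py : Prop := ∀ (text : String), Dom_split_toml_blocks_py text → Spec_split_toml_blocks_py text (split_toml_blocks_py text)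

-- ===== LEMMAS AND PROOFS =====

theorem pvChunks_nil : pvChunks [] = [] := by rw [pvChunks.eq_def]

theorem pvChunks_cons (head : String) (rest : List String) :
    pvChunks (head :: rest) =
      ((if pvIsHeader head then PySem.Str.strip head else ""),
       PySem.Str.join "" (head :: rest.takeWhile (fun l => !pvIsHeader l))) ::
      pvChunks (rest.drop (rest.takeWhile (fun l => !pvIsHeader l)).length) := by
  rw [pvChunks.eq_def]

-- A's fold, flushed at the end, emits the pending block and then chunks the rest.
theorem pv_fold_chunks (L : List String) : ∀ (blocks : List (String × String)) (h : String)
    (cur : List String), cur ≠ [] →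
    (let st := L.foldl pvStepA (blocks, h, cur)
     if st.2.2 ≠ [] then st.1 ++ [(st.2.1, PySem.Str.join "" st.2.2)] else st.1) =
    blocks ++ (h, PySem.Str.join "" (cur ++ L.takeWhile (fun l => !pvIsHeader l))) ::
      pvChunks (L.drop (L.takeWhile (fun l => !pvIsHeader l)).length) := by
  induction L with
  | nil => intro blocks h cur hc; simp [pvChunks_nil, hc]
  | cons l L ih =>
    intro blocks h cur hc
    by_cases hl : pvIsHeader l = true
    · have step : pvStepA (blocks, h, cur) l =
        (blocks ++ [(h, PySem.Str.join "" cur)], PySem.Str.strip l, [l]) := by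
        simp [pvStepA, hl, hc]
      rw [List.foldl_cons, step, ih _ _ [l] (by simp)]
      simp [pvChunks_cons, hl]
    · have step : pvStepA (blocks, h, cur) l = (blocks, h, cur ++ [l]) := by
        simp [pvStepA, hl]
      rw [List.foldl_cons, step, ih _ _ (cur ++ [l]) (by simp)]
      simp [hl]

-- ===== VERDICT (by name: the statement is the Claim_ definition above) =====
theorem split_toml_blocks_py_spec : Claim_equal_split_toml_blocks_py := by
  intro text _
  unfold Spec_split_toml_blocks_py split_toml_blocks_py split_toml_blocks_py_alt
  cases hL : pvSplitKeep [] text.toList with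
  | nil => simp [pvChunks_nil]
  | cons l L =>
    by_cases hl : pvIsHeader l = true
    · have step : pvStepA ([], "", []) l = ([], PySem.Str.strip l, [l]) := by
        simp [pvStepA, hl]
      rw [List.foldl_cons, step, pv_fold_chunks L _ _ [l] (by simp)]
      simp [pvChunks_cons, hl]
    · have step : pvStepA ([], "", []) l = ([], "", [l]) := by
        simp [pvStepA, hl]
      rw [List.foldl_cons, step, pv_fold_chunks L _ _ [l] (by simp)]
      simp [pvChunks_cons, hl]
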